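-- pv_equiv track=rewrite | github.com/Onselius/adventofcode2 | python/2024/day14/day14.py | check_joining
-- ===== SOURCE A (Python) =====
-- def check_joining(size, positions, amount):
--     maxY: int = size[0]
--     maxX: int = size[1]
--     minY: int = 0
--     minX: int = 0
--
--     count = 0
--     for r in range(minY, maxY + 1):
--         for c in range(minX, maxX + 1):
--             if (r, c) in positions:
--                 count += 1
--             else:
--                 count = 0
--             if count == amount:
--                 return True
--     return False
-- ===== SOURCE B (Python) =====
-- def check_joining(size, positions, amount):
--     max_y, max_x = size[0], size[1]
--     w = max_x + 1
--     occ = sorted({r * w + c for (r, c) in positions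
--                   if 0 <= r <= max_y and 0 <= c <= max_x})
--     run, prev = 0, None
--     for i in occ:
--         run = run + 1 if prev == i - 1 else 1
--         if run == amount:
--             return True
--         prev = i
--     return False
-- ===== Notes on version B (the rewrite author's own statement) =====
-- stated objective: faster
-- what changed: Instead of scanning every cell of the W*H grid with a membership test against the positions list (O(W*H*P)), B maps the in-grid positions to raster indices, sorts the distinct indices, and scans that sorted list for a run of `amount` consecutive integers (O(P log P), independent of the grid area); Pre_ excludes size lists shorter than 2 (A raises IndexError) and amount = 0, which is outside a run-length's natural domain and on which A's count==amount test fires at the first empty cell.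
-- outside the precondition, e.g. on check_joining((0, 0), set(), 0): A returns True, B returns False
import Mathlib
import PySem

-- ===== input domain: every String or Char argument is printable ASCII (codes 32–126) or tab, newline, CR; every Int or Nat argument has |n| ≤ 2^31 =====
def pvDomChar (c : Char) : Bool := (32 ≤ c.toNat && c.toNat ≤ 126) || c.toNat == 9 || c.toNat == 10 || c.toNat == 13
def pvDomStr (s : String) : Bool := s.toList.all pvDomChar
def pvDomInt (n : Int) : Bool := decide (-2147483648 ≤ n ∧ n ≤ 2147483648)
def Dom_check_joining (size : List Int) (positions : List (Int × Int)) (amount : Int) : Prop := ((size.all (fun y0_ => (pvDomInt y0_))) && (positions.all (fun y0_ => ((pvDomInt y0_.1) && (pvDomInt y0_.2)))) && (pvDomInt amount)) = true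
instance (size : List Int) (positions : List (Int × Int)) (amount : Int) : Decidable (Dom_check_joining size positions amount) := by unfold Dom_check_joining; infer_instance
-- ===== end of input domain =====

-- B replaces A's full raster scan of the (maxY+1)×(maxX+1) grid (a positions-list
-- membership test per cell) by: map the in-grid positions to raster indices, sort the
-- distinct indices, and scan that sorted list for a run of `amount` consecutive integers.

-- ===== PORT A =====
-- inner `for c in range(minX, maxX + 1)` loop; `none` = the function returned True,
-- `some count` = loop finished with this count
def cjInner (positions : List (Int × Int)) (amount r : Int) : List Int → Int → Option Int
  | [], count => some count
  | c :: cs, count =>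
    let count' := if (r, c) ∈ positions then count + 1 else 0
    if count' = amount then none
    else cjInner positions amount r cs count'

-- outer `for r in range(minY, maxY + 1)` loop
def cjOuter (positions : List (Int × Int)) (amount maxX : Int) : List Int → Int → Bool
  | [], _ => false
  | r :: rs, count =>
    match cjInner positions amount r (PySem.List.pyRange 0 (maxX + 1) 1) count with
    | none => true
    | some count' => cjOuter positions amount maxX rs count'

def check_joining (size : List Int) (positions : List (Int × Int)) (amount : Int) : Bool :=
  match PySem.List.pyGet? size 0, PySem.List.pyGet? size 1 with
  | some maxY, some maxX =>
      cjOuter positions amount maxX (PySem.List.pyRange 0 (maxY + 1) 1) 0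
  | _, _ => false  -- size[0]/size[1] raises IndexError: excluded by Pre_

-- ===== PORT B =====
-- `for i in occ:` loop with state (run, prev); the match splits Python's
-- `run = run + 1 if prev == i - 1 else 1` on `prev is None` (None never equals an int)
def cjScan (amount : Int) : List Int → Int → Option Int → Bool
  | [], _, _ => false
  | i :: is, _, none =>
    let run' := (1 : Int)
    if run' = amount then true else cjScan amount is run' (some i)
  | i :: is, run, some p =>
    let run' := if p = i - 1 then run + 1 else 1
    if run' = amount then true else cjScan amount is run' (some i)

def check_joining_alt (size : List Int) (positions : List (Int × Int)) (amount : Int) : Bool :=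
  match PySem.List.pyGet? size 0 with
  | none => false  -- size[0] raises IndexError: excluded by Pre_
  | some maxY =>
    match PySem.List.pyGet? size 1 with
    | none => false  -- size[1] raises IndexError: excluded by Pre_
    | some maxX =>
      let w := maxX + 1
      let occ := PySem.List.sorted (PySem.Set.ofList
        ((positions.filter (fun p => decide (0 ≤ p.1 ∧ p.1 ≤ maxY ∧ 0 ≤ p.2 ∧ p.2 ≤ maxX))).map
          (fun p => p.1 * w + p.2))) (fun x => x) false
      cjScan amount occ 0 none

-- ===== PRECONDITION & SPEC =====
-- Pre_ excludes size lists shorter than 2, on which A raises IndexError, and amount = 0,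
-- which is outside a run-length's natural domain and on which A's count==amount test
-- fires at the first empty cell.
def Pre_check_joining (size : List Int) (positions : List (Int × Int)) (amount : Int) : Prop :=
  2 ≤ size.length ∧ amount ≠ 0
instance (size : List Int) (positions : List (Int × Int)) (amount : Int) : Decidable (Pre_check_joining size positions amount) := by unfold Pre_check_joining; infer_instance

def pvWitness_check_joining : List Int × (List (Int × Int)) × Int := ([1, 2], [(0, 0), (0, 1)], 2)

def Spec_check_joining (size : List Int) (positions : List (Int × Int)) (amount : Int) (out : Bool) : Prop := out = check_joining_alt size positions amount
instance (size : List Int) (positions : List (Int × Int)) (amount : Int) (out : Bool) : Decidable (Spec_check_joining size positions amount out) := by unfold Spec_check_joining; infer_instance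

-- ===== CLAIM (what is proved, stated in full; the proofs are below) =====
def Claim_equal_check_joining : Prop := ∀ (size : List Int) (positions : List (Int × Int)) (amount : Int), Dom_check_joining size positions amount → Pre_check_joining size positions amount → Spec_check_joining size positions amount (check_joining size positions amount)

-- ===== LEMMAS AND PROOFS =====

-- proof-only reference scan: A's counter scan over an explicit list of cells
def scanP (positions : List (Int × Int)) (amount : Int) : List (Int × Int) → Int → Bool
  | [], _ => false
  | p :: ps, count =>
    let count' := if p ∈ positions then count + 1 else 0
    if count' = amount then true else scanP positions amount ps count'

-- proof-only reference scan: the same counter scan over raster indices, occupancy = membership in S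
def scan2 (S : List Int) (amount : Int) : List Int → Int → Bool
  | [], _ => false
  | k :: ks, count =>
    let count' := if k ∈ S then count + 1 else 0
    if count' = amount then true else scan2 S amount ks count'

lemma scanP_append (positions : List (Int × Int)) (amount r : Int) (cs : List Int)
    (rest : List (Int × Int)) (count : Int) :
    scanP positions amount (cs.map (fun c => (r, c)) ++ rest) count
      = match cjInner positions amount r cs count with
        | none => true
        | some count' => scanP positions amount rest count' := by
  induction cs generalizing count with
  | nil => simp [cjInner]
  | cons c cs ih =>
      simp only [List.map_cons, List.cons_append, scanP, cjInner]
      split_ifs with h1 <;> simp [ih]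

lemma cjOuter_eq_scanP (positions : List (Int × Int)) (amount maxX : Int) (rs : List Int)
    (count : Int) :
    cjOuter positions amount maxX rs count
      = scanP positions amount
          (rs.flatMap (fun r => (PySem.List.pyRange 0 (maxX + 1) 1).map (fun c => (r, c)))) count := by
  induction rs generalizing count with
  | nil => simp [cjOuter, scanP]
  | cons r rs ih =>
      rw [List.flatMap_cons, scanP_append]
      simp only [cjOuter]
      cases cjInner positions amount r (PySem.List.pyRange 0 (maxX + 1) 1) count with
      | none => rfl
      | some c' => exact ih c'

lemma scanP_eq_scan2 (positions : List (Int × Int)) (S : List Int) (amount : Int)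
    (f : Int × Int → Int) (l : List (Int × Int))
    (hmem : ∀ p ∈ l, (p ∈ positions ↔ f p ∈ S)) (count : Int) :
    scanP positions amount l count = scan2 S amount (l.map f) count := by
  induction l generalizing count with
  | nil => rfl
  | cons p ps ih =>
      have hp := hmem p (List.mem_cons_self ..)
      simp only [List.map_cons, scanP, scan2]
      have hif : (if p ∈ positions then count + 1 else 0) = (if f p ∈ S then count + 1 else 0) := by
        by_cases h : p ∈ positions
        · rw [if_pos h, if_pos (hp.1 h)]
        · rw [if_neg h, if_neg (fun hc => h (hp.2 hc))]
      rw [hif]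
      by_cases h2 : (if f p ∈ S then count + 1 else 0) = amount
      · rw [if_pos h2, if_pos h2]
      · rw [if_neg h2, if_neg h2]
        exact ih (fun q hq => hmem q (List.mem_cons_of_mem _ hq)) _

-- one raster row: c ↦ r*W + c over [0, W) is the consecutive range [r*W, r*W + W)
lemma map_row (r W : Int) :
    (PySem.List.pyRange 0 W 1).map (fun c => r * W + c) = PySem.List.pyRange (r * W) (r * W + W) 1 := by
  rw [PySem.List.pyRange_one 0 W, PySem.List.pyRange_one (r * W) (r * W + W)]
  simp [List.map_map, Function.comp_def]

-- flattening all rows gives the consecutive range [0, n*W)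
lemma flatMap_rows (W : Int) (hW : 0 ≤ W) (n : ℕ) :
    (PySem.List.pyRange 0 (n : Int) 1).flatMap
        (fun r => PySem.List.pyRange (r * W) (r * W + W) 1)
      = PySem.List.pyRange 0 ((n : Int) * W) 1 := by
  induction n with
  | zero => simp [PySem.List.pyRange_one_eq_nil]
  | succ n ih =>
      have hsplit : PySem.List.pyRange 0 ((n : Int) + 1) 1
          = PySem.List.pyRange 0 (n : Int) 1 ++ [(n : Int)] := by
        exact PySem.List.pyRange_one_succ_right (by positivity)
      push_cast
      rw [hsplit, List.flatMap_append, ih]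
      simp only [List.flatMap_cons, List.flatMap_nil, List.append_nil]
      have h1 : (0 : Int) ≤ (n : Int) * W := by positivity
      have h2 : (n : Int) * W ≤ ((n : Int) + 1) * W := by nlinarith
      rw [PySem.List.pyRange_one_append 0 ((n : Int) * W) (((n : Int) + 1) * W) h1 h2]
      congr 1
      ring_nf

-- uniqueness of the raster decomposition
lemma raster_inj (a b a' b' W : Int) (hb : 0 ≤ b) (hbW : b < W) (hb' : 0 ≤ b') (hb'W : b' < W)
    (h : a * W + b = a' * W + b') : a = a' ∧ b = b' := by
  have hW : 0 < W := lt_of_le_of_lt hb hbW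
  have e1 : (b + W * a) / W = b / W + a := Int.add_mul_ediv_left b a (ne_of_gt hW)
  have e2 : (b' + W * a') / W = b' / W + a' := Int.add_mul_ediv_left b' a' (ne_of_gt hW)
  have z1 : b / W = 0 := Int.ediv_eq_zero_of_lt hb hbW
  have z2 : b' / W = 0 := Int.ediv_eq_zero_of_lt hb' hb'W
  have harg : b + W * a = b' + W * a' := by linarith
  have ha : a = a' := by rw [harg] at e1; rw [e2] at e1; omega
  refine ⟨ha, ?_⟩
  rw [ha] at h; linarith

-- step lemmas for the sorted suffix kept by B's scan
lemma filter_ge_cons (S : List Int) (hS : S.Pairwise (· < ·)) (k : Int) (hk : k ∈ S) :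
    S.filter (fun i => decide (k ≤ i)) = k :: S.filter (fun i => decide (k + 1 ≤ i)) := by
  induction S with
  | nil => simp at hk
  | cons h t ih =>
      rcases List.mem_cons.mp hk with rfl | hk'
      · have hgt : ∀ i ∈ t, k < i := fun i hi => (List.pairwise_cons.mp hS).1 i hi
        simp only [List.filter_cons, decide_eq_true_eq]
        rw [if_pos (by simp), if_neg (by simp)]
        congr 1
        exact List.filter_congr (fun i hi => by
          have := hgt i hi; simp; omega)
      · have hlt : h < k := (List.pairwise_cons.mp hS).1 k hk'
        simp only [List.filter_cons]
        rw [if_neg (by simp; omega), if_neg (by simp; omega)]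
        exact ih (List.pairwise_cons.mp hS).2 hk'

lemma filter_ge_skip (S : List Int) (k : Int) (hk : k ∉ S) :
    S.filter (fun i => decide (k ≤ i)) = S.filter (fun i => decide (k + 1 ≤ i)) := by
  apply List.filter_congr
  intro i hi
  have : i ≠ k := fun h => hk (h ▸ hi)
  simp; omega

-- the simulation: B's scan over the sorted occupied-index suffix equals A's counter scan
-- over the remaining consecutive raster indices
lemma scan_sim (S : List Int) (amount : Int) (ha : 1 ≤ amount) (hS : S.Pairwise (· < ·))
    (n : ℕ) :
    ∀ (k count run : Int) (prev : Option Int),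
    0 ≤ count → count < amount →
    (count = 0 → (prev = none ∨ ∃ p, prev = some p ∧ p + 1 < k)) →
    (0 < count → prev = some (k - 1) ∧ run = count) →
    (∀ i ∈ S, i < k + n) →
    cjScan amount (S.filter (fun i => decide (k ≤ i))) run prev
      = scan2 S amount (PySem.List.pyRange k (k + n) 1) count := by
  induction n with
  | zero =>
      intro k count run prev _ _ _ _ hub
      have hfe : S.filter (fun i => decide (k ≤ i)) = [] := by
        rw [List.filter_eq_nil_iff]
        intro i hi
        have := hub i hi
        simp; omega
      rw [hfe]
      simp [cjScan, scan2]
  | succ n ih =>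
      intro k count run prev hc0 hca hprev0 hprevp hub
      have hcons : PySem.List.pyRange k (k + ((n:ℕ) + 1 : ℕ)) 1
          = k :: PySem.List.pyRange (k + 1) ((k + 1) + (n : Int)) 1 := by
        rw [PySem.List.pyRange_one_cons (by push_cast; omega)]
        congr 1
        push_cast; ring
      rw [hcons]
      by_cases hk : k ∈ S
      · rw [filter_ge_cons S hS k hk]
        rcases prev with _ | p
        · have hz : count = 0 := by
            by_contra hne
            have := (hprevp (by omega)).1
            simp at this
          subst hz
          simp only [cjScan, scan2, if_pos hk]
          by_cases heq : (0 : Int) + 1 = amount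
          · rw [if_pos (show (1 : Int) = amount by omega), if_pos heq]
          · rw [if_neg (by omega), if_neg heq]
            exact ih (k + 1) (0 + 1) 1 (some k) (by omega) (by omega) (by omega)
              (fun _ => ⟨by norm_num, by norm_num⟩)
              (fun i hi => by have := hub i hi; push_cast at this ⊢; omega)
        · have hrun' : (if p = k - 1 then run + 1 else 1) = count + 1 := by
            rcases lt_or_eq_of_le hc0 with hpos | hzero
            · obtain ⟨hp, hr⟩ := hprevp hpos
              have hpk : p = k - 1 := Option.some.inj hp
              rw [if_pos hpk]
              omega
            · rcases hprev0 hzero.symm with hn | ⟨p', hp', hlt⟩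
              · simp at hn
              · have hpp : p = p' := Option.some.inj hp'
                rw [if_neg (by omega)]
                omega
          simp only [cjScan, scan2, if_pos hk, hrun']
          by_cases heq : count + 1 = amount
          · rw [if_pos heq, if_pos heq]
          · rw [if_neg heq, if_neg heq]
            exact ih (k + 1) (count + 1) (count + 1) (some k) (by omega) (by omega)
              (by omega) (fun _ => ⟨by norm_num, rfl⟩)
              (fun i hi => by have := hub i hi; push_cast at this ⊢; omega)
      · rw [filter_ge_skip S k hk]
        simp only [scan2, if_neg hk]
        rw [if_neg (by omega : ¬ (0 : Int) = amount)]
        refine ih (k + 1) 0 run prev (by omega) (by omega) ?_ (by omega)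
          (fun i hi => by have := hub i hi; push_cast at this ⊢; omega)
        intro _
        rcases lt_or_eq_of_le hc0 with hpos | hzero
        · obtain ⟨hp, _⟩ := hprevp hpos
          exact Or.inr ⟨k - 1, hp, by omega⟩
        · rcases hprev0 hzero.symm with hn | ⟨p, hp, hlt⟩
          · exact Or.inl hn
          · exact Or.inr ⟨p, hp, by omega⟩

-- amount < 0: A's counter never goes negative, so it never fires
lemma scan2_neg (S : List Int) (amount : Int) (ha : amount < 0) (ks : List Int) :
    ∀ count, 0 ≤ count → scan2 S amount ks count = false := by
  induction ks with
  | nil => intro count _; rfl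
  | cons k ks ih =>
      intro count hc
      simp only [scan2]
      by_cases hk : k ∈ S
      · rw [if_pos hk, if_neg (by omega)]
        exact ih _ (by omega)
      · rw [if_neg hk, if_neg (by omega)]
        exact ih _ (by omega)

-- amount < 0: B's run counter stays positive, so it never fires either
lemma cjScan_neg (amount : Int) (ha : amount < 0) (l : List Int) :
    ∀ (run : Int) (prev : Option Int), 0 ≤ run → cjScan amount l run prev = false := by
  induction l with
  | nil => intro run prev _; rfl
  | cons i is ih =>
      intro run prev hr
      rcases prev with _ | p
      · simp only [cjScan]
        rw [if_neg (by omega)]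
        exact ih _ _ (by omega)
      · simp only [cjScan]
        have hge : (0 : Int) ≤ (if p = i - 1 then run + 1 else 1) := by
          split_ifs <;> omega
        rw [if_neg (by omega)]
        exact ih _ _ (by omega)

-- degenerate grid: empty inner range never changes the count, the whole loop is False
lemma cjOuter_empty_inner (positions : List (Int × Int)) (amount maxX : Int)
    (hW : maxX + 1 ≤ 0) (rs : List Int) (count : Int) :
    cjOuter positions amount maxX rs count = false := by
  induction rs generalizing count with
  | nil => rfl
  | cons r rs ih =>
      simp only [cjOuter, PySem.List.pyRange_one_eq_nil hW, cjInner]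
      exact ih count

-- ===== VERDICT (by name: the statement is the Claim_ definition above) =====
theorem check_joining_spec : Claim_equal_check_joining := by
  intro size positions amount _ hpre
  unfold Spec_check_joining
  obtain ⟨hlen, hamt⟩ := hpre
  rcases size with _ | ⟨maxY, size'⟩
  · simp at hlen
  rcases size' with _ | ⟨maxX, rest⟩
  · simp at hlen
  have h0 : PySem.List.pyGet? (maxY :: maxX :: rest) 0 = some maxY :=
    PySem.List.pyGet?_zero_cons _ _
  have h1 : PySem.List.pyGet? (maxY :: maxX :: rest) 1 = some maxX := by
    have := PySem.List.pyGet?_cons_succ (x := maxY) (xs := maxX :: rest) (n := 0)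
    simpa [PySem.List.pyGet?_zero_cons] using this
  simp only [check_joining, check_joining_alt, h0, h1]
  set occ := PySem.List.sorted (PySem.Set.ofList
      ((positions.filter (fun p => decide (0 ≤ p.1 ∧ p.1 ≤ maxY ∧ 0 ≤ p.2 ∧ p.2 ≤ maxX))).map
        (fun p => p.1 * (maxX + 1) + p.2))) (fun x => x) false with hoccdef
  have hocc : ∀ x : Int, x ∈ occ ↔ ∃ p, p ∈ positions ∧
      (0 ≤ p.1 ∧ p.1 ≤ maxY ∧ 0 ≤ p.2 ∧ p.2 ≤ maxX) ∧ p.1 * (maxX + 1) + p.2 = x := by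
    intro x
    rw [hoccdef, PySem.List.mem_sorted, PySem.Set.mem_ofList, List.mem_map]
    constructor
    · rintro ⟨p, hp, rfl⟩
      rw [List.mem_filter] at hp
      exact ⟨p, hp.1, by simpa using hp.2, rfl⟩
    · rintro ⟨p, hp, hb, rfl⟩
      exact ⟨p, List.mem_filter.mpr ⟨hp, by simpa using hb⟩, rfl⟩
  have hpair : occ.Pairwise (· < ·) := PySem.List.sorted_ofList_pairwise_lt _
  by_cases hdeg : maxY < 0 ∨ maxX < 0
  · -- degenerate grid: A's loops fire nothing, B's occ is empty
    have hoccnil : occ = [] := by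
      rw [List.eq_nil_iff_forall_not_mem]
      intro x hx
      obtain ⟨p, _, ⟨b1, b2, b3, b4⟩, _⟩ := (hocc x).1 hx
      omega
    rw [hoccnil]
    rcases hdeg with hH | hW
    · rw [PySem.List.pyRange_one_eq_nil (by omega)]; rfl
    · rw [cjOuter_empty_inner positions amount maxX (by omega) _ 0]; rfl
  · push_neg at hdeg
    obtain ⟨hH, hW⟩ := hdeg
    have hbounds : ∀ x ∈ occ, 0 ≤ x ∧ x < (maxY + 1) * (maxX + 1) := by
      intro x hx
      obtain ⟨p, _, ⟨b1, b2, b3, b4⟩, rfl⟩ := (hocc x).1 hx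
      have hge : 0 ≤ p.1 * (maxX + 1) := mul_nonneg b1 (by omega)
      have hle : p.1 * (maxX + 1) ≤ maxY * (maxX + 1) :=
        mul_le_mul_of_nonneg_right b2 (by omega)
      have hring : (maxY + 1) * (maxX + 1) = maxY * (maxX + 1) + (maxX + 1) := by ring
      constructor <;> omega
    -- the A-side chain: nested loops = counter scan over the raster indices
    have hcells : ∀ p ∈ (PySem.List.pyRange 0 (maxY + 1) 1).flatMap
        (fun r => (PySem.List.pyRange 0 (maxX + 1) 1).map (fun c => (r, c))),
        (p ∈ positions ↔ p.1 * (maxX + 1) + p.2 ∈ occ) := by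
      intro p hp
      simp only [List.mem_flatMap, List.mem_map] at hp
      obtain ⟨r, hr, c, hc, rfl⟩ := hp
      rw [PySem.List.mem_pyRange_one] at hr hc
      constructor
      · intro hpos
        exact (hocc _).2 ⟨(r, c), hpos, ⟨hr.1, by omega, hc.1, by omega⟩, rfl⟩
      · intro hin
        obtain ⟨q, hq, ⟨b1, b2, b3, b4⟩, heq⟩ := (hocc _).1 hin
        obtain ⟨e1, e2⟩ := raster_inj q.1 q.2 r c (maxX + 1) b3 (by omega) hc.1 (by omega) heq
        have hqe : q = (r, c) := by
          obtain ⟨q1, q2⟩ := q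
          simp only at e1 e2
          rw [e1, e2]
        rwa [hqe] at hq
    have hA : cjOuter positions amount maxX (PySem.List.pyRange 0 (maxY + 1) 1) 0
        = scan2 occ amount (PySem.List.pyRange 0 ((maxY + 1) * (maxX + 1)) 1) 0 := by
      rw [cjOuter_eq_scanP,
        scanP_eq_scan2 positions occ amount (fun p => p.1 * (maxX + 1) + p.2) _ hcells 0]
      congr 1
      rw [List.map_flatMap]
      have hrow : ∀ r : Int, ((PySem.List.pyRange 0 (maxX + 1) 1).map
            (fun c => (r, c))).map (fun p : Int × Int => p.1 * (maxX + 1) + p.2)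
          = PySem.List.pyRange (r * (maxX + 1)) (r * (maxX + 1) + (maxX + 1)) 1 := by
        intro r
        rw [List.map_map]
        have : ((fun p : Int × Int => p.1 * (maxX + 1) + p.2) ∘ (fun c => (r, c)))
            = fun c => r * (maxX + 1) + c := rfl
        rw [this, map_row]
      simp only [hrow]
      have hcast : ((maxY + 1).toNat : Int) = maxY + 1 := Int.toNat_of_nonneg (by omega)
      rw [← hcast, flatMap_rows (maxX + 1) (by omega)]
    by_cases hneg : amount < 0
    · rw [hA, scan2_neg occ amount hneg _ 0 le_rfl,
        cjScan_neg amount hneg occ 0 none le_rfl]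
    · have ha1 : 1 ≤ amount := by omega
      have hT : 0 < (maxY + 1) * (maxX + 1) := mul_pos (by omega) (by omega)
      have hsim := scan_sim occ amount ha1 hpair ((maxY + 1) * (maxX + 1)).toNat 0 0 0 none
        le_rfl (by omega) (fun _ => Or.inl rfl) (by omega)
        (fun i hi => by have := (hbounds i hi).2; omega)
      have hfix : occ.filter (fun i => decide (0 ≤ i)) = occ :=
        List.filter_eq_self.mpr (fun i hi => by simpa using (hbounds i hi).1)
      rw [hfix] at hsim
      rw [show (0 : Int) + (((maxY + 1) * (maxX + 1)).toNat : Int) = (maxY + 1) * (maxX + 1)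
        by omega] at hsim
      rw [hA, ← hsim]
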